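-- pv_equiv track=rewrite | github.com/hojoungjang/programming-exercises | 15486-퇴사-2/solution.py | solution
-- ===== SOURCE A (Python) =====
-- def solution(schedule):
--     n = len(schedule)
--     max_earnings = [0 for _ in range(n + 1)]
--
--     for i in reversed(range(n)):
--         max_earnings[i] = max_earnings[i+1]
--         time, price = schedule[i]
--         end_i = i + time
--         if end_i <= n:
--             max_earnings[i] = max(max_earnings[i], max_earnings[end_i] + price)
--
--     return max(max_earnings)
-- ===== SOURCE B (Python) =====
-- def solution(schedule):
--     # Forward "push" DP: dp[j] = best earnings achievable occupying days up to j.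
--     n = len(schedule)
--     dp = [0] * (n + 1)
--     for i in range(n):
--         time, price = schedule[i]
--         end = i + time
--         if end <= n:
--             dp[end] = max(dp[end], dp[i] + price)
--         dp[i + 1] = max(dp[i + 1], dp[i])
--     return dp[n]
-- ===== Notes on version B (the rewrite author's own statement) =====
-- stated objective: alternative
-- what changed: Replaces the backward best-remaining DP (and the final max over the whole array) with a forward push DP whose cell dp[j] means best earnings using days up to j, returning dp[n] directly.
-- outside the precondition, e.g. on solution([(1, 1), (-1, 10)]): A returns 11, B returns 1; on solution([(-3, 5)]): A raises IndexError, B raises IndexError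
import Mathlib
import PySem

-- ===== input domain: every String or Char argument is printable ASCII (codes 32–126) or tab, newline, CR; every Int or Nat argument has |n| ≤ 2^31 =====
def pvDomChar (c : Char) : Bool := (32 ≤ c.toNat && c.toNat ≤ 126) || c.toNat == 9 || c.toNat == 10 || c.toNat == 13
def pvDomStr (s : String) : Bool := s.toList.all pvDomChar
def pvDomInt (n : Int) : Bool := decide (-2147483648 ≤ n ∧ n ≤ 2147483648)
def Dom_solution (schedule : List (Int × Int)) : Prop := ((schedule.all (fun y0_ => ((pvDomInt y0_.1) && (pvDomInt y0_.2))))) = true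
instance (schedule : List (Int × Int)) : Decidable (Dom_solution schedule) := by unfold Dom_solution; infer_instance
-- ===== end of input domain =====

-- B replaces A's backward best-remaining DP (plus a final max over the array) with a forward
-- push DP whose cell dp[j] is the best earnings using days up to j, returned as dp[n]
-- (objective: alternative — same O(n) cost, different recurrence direction and cell meaning).

-- ===== PORT A =====
-- One iteration of A's backward loop body for index i.
-- schedule[i] and max_earnings[i+1] are always in range (i < n), ported with getD;
-- max_earnings[end_i] may see a negative end_i, ported with pyGetD (exact under
-- Raise.InRange; end_i < 0 only occurs for a negative time, outside Pre_solution).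
def solutionStepA (schedule : List (Int × Int)) (n : Nat) (dp : List Int) (i : Nat) : List Int :=
  let dp1 := dp.set i (dp.getD (i + 1) 0)
  let tp := schedule.getD i (0, 0)
  let endi : Int := (i : Int) + tp.1
  if endi ≤ (n : Int) then
    dp1.set i (max (dp1.getD i 0) (PySem.List.pyGetD dp1 endi 0 + tp.2))
  else dp1

def solution (schedule : List (Int × Int)) : Int :=
  let n := schedule.length
  let init := List.replicate (n + 1) (0 : Int)
  let dp := ((List.range n).reverse).foldl (solutionStepA schedule n) init
  -- max(max_earnings): the list has n+1 ≥ 1 entries, so Python never raises; getD is exact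
  (PySem.List.max? dp (fun x => x)).getD 0

-- ===== PORT B =====
-- One iteration of B's forward loop body for index i: push job i, then carry dp[i] forward.
-- dp[end] is read/written with pyGetD/pySetD (exact under Raise.InRange; a negative end
-- only occurs for a negative time, outside Pre_solution); dp[i], dp[i+1] are always in range.
def solutionStepB (schedule : List (Int × Int)) (n : Nat) (dp : List Int) (i : Nat) : List Int :=
  let tp := schedule.getD i (0, 0)
  let endi : Int := (i : Int) + tp.1
  let dp1 :=
    if endi ≤ (n : Int) then
      PySem.List.pySetD dp endi (max (PySem.List.pyGetD dp endi 0) (dp.getD i 0 + tp.2))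
    else dp
  dp1.set (i + 1) (max (dp1.getD (i + 1) 0) (dp1.getD i 0))

def solution_alt (schedule : List (Int × Int)) : Int :=
  let n := schedule.length
  let dp := (List.range n).foldl (solutionStepB schedule n) (List.replicate (n + 1) (0 : Int))
  dp.getD n 0

-- ===== PRECONDITION & SPEC =====
-- Pre_ restricts to the problem's natural domain of nonnegative consultation times: on a
-- negative time A raises IndexError or returns a value produced by negative-index wraparound
-- and stale (still-zero) dp cells, an artefact of its backward in-place update.
def Pre_solution (schedule : List (Int × Int)) : Prop := ∀ tp ∈ schedule, 0 ≤ tp.1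
instance (schedule : List (Int × Int)) : Decidable (Pre_solution schedule) := by unfold Pre_solution; infer_instance

def pvWitness_solution : (List (Int × Int)) := [(3, 10), (1, 5), (0, 2)]

def Spec_solution (schedule : List (Int × Int)) (out : Int) : Prop := out = solution_alt schedule
instance (schedule : List (Int × Int)) (out : Int) : Decidable (Spec_solution schedule out) := by unfold Spec_solution; infer_instance

-- ===== CLAIM (what is proved, stated in full; the proofs are below) =====
def Claim_equal_solution : Prop := ∀ (schedule : List (Int × Int)), Dom_solution schedule → Pre_solution schedule → Spec_solution schedule (solution schedule)

-- ===== LEMMAS AND PROOFS =====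

-- The common mathematical value: fA s i = best earnings obtainable from day i on
-- (A's recurrence, read off its backward loop; for time = 0 the inner read sees the
-- freshly written dp[i+1]-value, hence the `max (i+1) …` index).
def fA (s : List (Int × Int)) (i : Nat) : Int :=
  if h : i < s.length then
    let tp := s.getD i (0, 0)
    if (i : Int) + tp.1 ≤ (s.length : Int) then
      max (fA s (i + 1)) (fA s (max (i + 1) ((i : Int) + tp.1).toNat) + tp.2)
    else fA s (i + 1)
  else 0
termination_by s.length - i
decreasing_by all_goals omega

lemma fA_of_ge (s : List (Int × Int)) (i : Nat) (h : s.length ≤ i) : fA s i = 0 := by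
  rw [fA]; simp [Nat.not_lt.mpr h]

lemma fA_succ_le (s : List (Int × Int)) (i : Nat) : fA s (i + 1) ≤ fA s i := by
  conv_rhs => rw [fA]
  by_cases h : i < s.length
  · simp only [h, dif_pos]
    split_ifs <;> simp
  · simp only [h, dif_neg, not_false_iff]
    rw [fA_of_ge s (i + 1) (by omega)]

lemma fA_antitone (s : List (Int × Int)) {i j : Nat} (h : i ≤ j) : fA s j ≤ fA s i := by
  induction j with
  | zero =>
    have h0 : i = 0 := by omega
    subst h0; exact le_refl _
  | succ k ih =>
    rcases Nat.lt_or_ge i (k + 1) with hlt | hge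
    · exact le_trans (fA_succ_le s k) (ih (by omega))
    · have : i = k + 1 := by omega
      subst this; exact le_refl _

-- small getD/set facts used by both loop invariants
lemma getD_replicate0 (n j : Nat) : (List.replicate n (0 : Int)).getD j 0 = 0 := by
  simp [List.getD, List.getElem?_replicate]
  split <;> rfl

lemma getD_set_self' (l : List Int) (i : Nat) (v d : Int) (h : i < l.length) :
    (l.set i v).getD i d = v := by
  simp [List.getD, h]

lemma getD_set_ne' (l : List Int) (i j : Nat) (v d : Int) (h : i ≠ j) :
    (l.set i v).getD j d = l.getD j d := by
  simp [List.getD, List.getElem?_set_ne h]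

lemma exists_getD_of_mem (l : List Int) (x : Int) (h : x ∈ l) :
    ∃ j, j < l.length ∧ l.getD j 0 = x := by
  obtain ⟨j, hj, he⟩ := List.mem_iff_getElem.mp h
  exact ⟨j, hj, by rw [List.getD_eq_getElem _ _ hj, he]⟩

lemma getD_mem (l : List Int) (j : Nat) (h : j < l.length) : l.getD j 0 ∈ l := by
  rw [List.getD_eq_getElem _ _ h]; exact List.getElem_mem h

-- ---- A side ----

def InvA (s : List (Int × Int)) (i : Nat) (dp : List Int) : Prop :=
  dp.length = s.length + 1 ∧ ∀ j, j ≤ s.length → dp.getD j 0 = if i ≤ j then fA s j else 0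

lemma stepA_inv (s : List (Int × Int)) (hts : Pre_solution s) (i : Nat) (hi : i < s.length)
    (dp : List Int) (h : InvA s (i + 1) dp) : InvA s i (solutionStepA s s.length dp i) := by
  obtain ⟨hlen, hdp⟩ := h
  have ht : 0 ≤ (s.getD i (0, 0)).1 := by
    apply hts
    rw [List.getD_eq_getElem _ _ hi]; exact List.getElem_mem hi
  have hfi1 : dp.getD (i + 1) 0 = fA s (i + 1) := by
    rw [hdp (i + 1) (by omega)]; simp
  have hilt : i < dp.length := by omega
  -- the freshly written dp1
  set dp1 := dp.set i (dp.getD (i + 1) 0) with hdp1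
  have hlen1 : dp1.length = s.length + 1 := by simp [hdp1, hlen]
  have hdp1get : ∀ j, j ≤ s.length → dp1.getD j 0 =
      if j = i then fA s (i + 1) else if i + 1 ≤ j then fA s j else 0 := by
    intro j hj
    by_cases hji : j = i
    · subst hji; rw [hdp1, getD_set_self' _ _ _ _ hilt, hfi1]; simp
    · rw [hdp1, getD_set_ne' _ _ _ _ _ (fun he => hji he.symm), hdp j hj]
      simp [hji]
  unfold solutionStepA
  simp only []
  by_cases hg : (i : Int) + (s.getD i (0, 0)).1 ≤ (s.length : Int)
  · rw [if_pos hg]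
    -- the value written at i is fA s i
    set e := ((i : Int) + (s.getD i (0, 0)).1).toNat with he
    have hei : (i : Int) + (s.getD i (0, 0)).1 = (e : Int) := by omega
    have hie : i ≤ e := by omega
    have hen : e ≤ s.length := by omega
    have hread : PySem.List.pyGetD dp1 ((i : Int) + (s.getD i (0, 0)).1) 0
        = fA s (max (i + 1) e) := by
      rw [hei, PySem.List.pyGetD_natCast, hdp1get e hen]
      rcases Nat.lt_or_ge i e with hlt | hge
      · have h1 : ¬ e = i := by omega
        rw [if_neg h1, if_pos (by omega), Nat.max_eq_right (by omega)]
      · have hei' : e = i := by omega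
        rw [if_pos hei', hei', Nat.max_eq_left (by omega)]
    have hval : max (dp1.getD i 0) (PySem.List.pyGetD dp1 ((i : Int) + (s.getD i (0, 0)).1) 0
        + (s.getD i (0, 0)).2) = fA s i := by
      rw [hread, hdp1get i (by omega)]
      simp only [if_true]
      conv_rhs => rw [fA]
      rw [dif_pos hi]
      simp only [if_pos hg, he]
    refine ⟨by rw [List.length_set]; exact hlen1, ?_⟩
    intro j hj
    by_cases hji : j = i
    · subst hji
      rw [getD_set_self' dp1 j _ 0 (by omega), hval]; simp
    · rw [getD_set_ne' _ _ _ _ _ (fun hh => hji hh.symm), hdp1get j hj, if_neg hji]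
      by_cases h2 : i + 1 ≤ j
      · rw [if_pos h2, if_pos (by omega)]
      · rw [if_neg h2, if_neg (by omega)]
  · rw [if_neg hg]
    refine ⟨hlen1, ?_⟩
    intro j hj
    rw [hdp1get j hj]
    by_cases hji : j = i
    · subst hji
      have hfi : fA s j = fA s (j + 1) := by
        conv_lhs => rw [fA]
        rw [dif_pos hi, if_neg hg]
      rw [if_pos rfl, if_pos (le_refl _), hfi]
    · rw [if_neg hji]
      by_cases h2 : i + 1 ≤ j
      · rw [if_pos h2, if_pos (by omega)]
      · rw [if_neg h2, if_neg (by omega)]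

lemma loopA_inv (s : List (Int × Int)) (hts : Pre_solution s) (i : Nat) (hi : i ≤ s.length)
    (dp : List Int) (h : InvA s i dp) :
    InvA s 0 (((List.range i).reverse).foldl (solutionStepA s s.length) dp) := by
  induction i generalizing dp with
  | zero =>
    simpa using h
  | succ k ih =>
    rw [List.range_succ, List.reverse_append]
    simp only [List.reverse_cons, List.reverse_nil, List.nil_append, List.singleton_append,
      List.foldl_cons]
    exact ih (by omega) _ (stepA_inv s hts k (by omega) dp h)

lemma solution_eq_fA (s : List (Int × Int)) (hts : Pre_solution s) : solution s = fA s 0 := by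
  unfold solution
  simp only []
  have hinit : InvA s s.length (List.replicate (s.length + 1) (0 : Int)) := by
    refine ⟨by simp, ?_⟩
    intro j hj
    rw [getD_replicate0]
    by_cases hje : s.length ≤ j
    · rw [if_pos hje, fA_of_ge s j hje]
    · rw [if_neg hje]
  obtain ⟨hlen, hdp⟩ := loopA_inv s hts s.length (le_refl _) _ hinit
  set dpF := ((List.range s.length).reverse).foldl (solutionStepA s s.length)
      (List.replicate (s.length + 1) (0 : Int)) with hdpF
  have hne : dpF ≠ [] := by
    intro hnil; rw [hnil] at hlen; simp at hlen
  obtain ⟨m, hm⟩ : ∃ m, PySem.List.max? dpF (fun x => x) = some m := by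
    cases hmx : PySem.List.max? dpF (fun x => x) with
    | none => exact absurd ((PySem.List.max?_eq_none_iff dpF _).mp hmx) hne
    | some m => exact ⟨m, rfl⟩
  have hmem := PySem.List.max?_mem hm
  have hmax := PySem.List.max?_isMax hm
  have hub : m ≤ fA s 0 := by
    obtain ⟨j, hj, he⟩ := exists_getD_of_mem dpF m hmem
    rw [← he, hdp j (by omega)]
    rw [if_pos (Nat.zero_le j)]
    exact fA_antitone s (Nat.zero_le j)
  have hlb : fA s 0 ≤ m := by
    have h0 : dpF.getD 0 0 = fA s 0 := by
      rw [hdp 0 (Nat.zero_le _)]; rfl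
    have := hmax _ (getD_mem dpF 0 (by omega))
    rw [h0] at this
    exact this
  rw [hm]
  exact le_antisymm hub hlb

-- ---- B side ----

def InvB (s : List (Int × Int)) (i : Nat) (dp : List Int) : Prop :=
  dp.length = s.length + 1 ∧
    (∀ j, i ≤ j → j ≤ s.length → dp.getD j 0 + fA s j ≤ fA s 0) ∧
    (∃ j, i ≤ j ∧ j ≤ s.length ∧ fA s 0 ≤ dp.getD j 0 + fA s j)

lemma stepB_inv (s : List (Int × Int)) (hts : Pre_solution s) (i : Nat) (hi : i < s.length)
    (dp : List Int) (h : InvB s i dp) : InvB s (i + 1) (solutionStepB s s.length dp i) := by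
  obtain ⟨hlen, hsound, j0, hj0i, hj0n, hcomp⟩ := h
  have ht : 0 ≤ (s.getD i (0, 0)).1 := by
    apply hts
    rw [List.getD_eq_getElem _ _ hi]; exact List.getElem_mem hi
  have hfa1 : fA s (i + 1) ≤ fA s i := fA_succ_le s i
  have hsi : dp.getD i 0 + fA s i ≤ fA s 0 := hsound i (le_refl _) (by omega)
  unfold solutionStepB
  simp only []
  by_cases hg : (i : Int) + (s.getD i (0, 0)).1 ≤ (s.length : Int)
  · rw [if_pos hg]
    set e := ((i : Int) + (s.getD i (0, 0)).1).toNat with he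
    have hei : (i : Int) + (s.getD i (0, 0)).1 = (e : Int) := by omega
    have hie : i ≤ e := by omega
    have hen : e ≤ s.length := by omega
    have helt : e < dp.length := by omega
    have hfa_eq : fA s i = max (fA s (i + 1)) (fA s (max (i + 1) e) + (s.getD i (0, 0)).2) := by
      conv_lhs => rw [fA]
      rw [dif_pos hi]
      simp only [if_pos hg, he]
    have hkey : fA s (max (i + 1) e) + (s.getD i (0, 0)).2 ≤ fA s i := by
      rw [hfa_eq]; exact le_max_right _ _
    rw [hei, PySem.List.pySetD_natCast, PySem.List.pyGetD_natCast]
    set v := max (dp.getD e 0) (dp.getD i 0 + (s.getD i (0, 0)).2) with hv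
    set dp1 := dp.set e v with hdp1def
    have hd1self : dp1.getD e 0 = v := getD_set_self' dp e v 0 helt
    have hd1ne : ∀ j, j ≠ e → dp1.getD j 0 = dp.getD j 0 :=
      fun j hj => getD_set_ne' dp e j v 0 (fun hh => hj hh.symm)
    have hlen1 : dp1.length = s.length + 1 := by simp [hdp1def, hlen]
    set w := max (dp1.getD (i + 1) 0) (dp1.getD i 0) with hw
    have h1lt : i + 1 < dp1.length := by omega
    have hd2self : (dp1.set (i + 1) w).getD (i + 1) 0 = w := getD_set_self' dp1 (i + 1) w 0 h1lt
    have hd2ne : ∀ j, j ≠ i + 1 → (dp1.set (i + 1) w).getD j 0 = dp1.getD j 0 :=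
      fun j hj => getD_set_ne' dp1 (i + 1) j w 0 (fun hh => hj hh.symm)
    have b1a : ∀ j, i + 1 ≤ j → j ≤ s.length → dp1.getD j 0 + fA s j ≤ fA s 0 := by
      intro j h1 h2
      by_cases hje : j = e
      · have h1' : i + 1 ≤ e := hje ▸ h1
        rw [hje, hd1self, hv, ← max_add_add_right]
        apply max_le (hsound e hie hen)
        have hmx : max (i + 1) e = e := by omega
        rw [hmx] at hkey
        linarith
      · rw [hd1ne j hje]; exact hsound j (by omega) h2
    have b1b : dp1.getD i 0 + fA s (i + 1) ≤ fA s 0 := by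
      by_cases hie' : i = e
      · rw [hie', hd1self, hv, ← max_add_add_right]
        have hmx : max (i + 1) e = i + 1 := by omega
        rw [hmx] at hkey
        rw [← hie']
        apply max_le <;> linarith
      · rw [hd1ne i (fun hh => hie' hh)]; linarith
    have hcar1 : dp1.getD (i + 1) 0 ≤ (dp1.set (i + 1) w).getD (i + 1) 0 := by
      rw [hd2self, hw]; exact le_max_left _ _
    have hcar2 : dp1.getD i 0 ≤ (dp1.set (i + 1) w).getD (i + 1) 0 := by
      rw [hd2self, hw]; exact le_max_right _ _
    have mono1 : ∀ j, dp.getD j 0 ≤ dp1.getD j 0 := by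
      intro j
      by_cases hje : j = e
      · subst hje; rw [hd1self, hv]; exact le_max_left _ _
      · rw [hd1ne j hje]
    refine ⟨by rw [List.length_set]; exact hlen1, ?_, ?_⟩
    · intro j h1 h2
      by_cases hj1 : j = i + 1
      · subst hj1
        rw [hd2self, hw, ← max_add_add_right]
        exact max_le (b1a (i + 1) (le_refl _) h2) b1b
      · rw [hd2ne j hj1]; exact b1a j h1 h2
    · rcases Nat.lt_or_ge j0 (i + 1) with hj0lt | hj0ge
      · have hj0eq : j0 = i := by omega
        subst hj0eq
        by_cases hc : fA s (max (j0 + 1) e) + (s.getD j0 (0, 0)).2 ≤ fA s (j0 + 1)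
        · have hfaeq' : fA s j0 = fA s (j0 + 1) := by rw [hfa_eq]; exact max_eq_left hc
          refine ⟨j0 + 1, le_refl _, by omega, ?_⟩
          have hm := le_trans (mono1 j0) hcar2
          linarith
        · rw [not_le] at hc
          have hfaeq' : fA s j0 = fA s (max (j0 + 1) e) + (s.getD j0 (0, 0)).2 := by
            rw [hfa_eq]; exact max_eq_right (le_of_lt hc)
          by_cases hee : e ≤ j0
          · have heei : j0 = e := by omega
            have hmx : max (j0 + 1) e = j0 + 1 := by omega
            rw [hmx] at hfaeq'
            have hp1 : dp.getD j0 0 + (s.getD j0 (0, 0)).2 ≤ dp1.getD j0 0 := by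
              rw [heei, hd1self, hv, ← heei]; exact le_max_right _ _
            refine ⟨j0 + 1, le_refl _, by omega, ?_⟩
            linarith [hcar2]
          · have hmx : max (j0 + 1) e = e := by omega
            rw [hmx] at hfaeq'
            have hp1 : dp.getD j0 0 + (s.getD j0 (0, 0)).2 ≤ dp1.getD e 0 := by
              rw [hd1self, hv]; exact le_max_right _ _
            have hp2 : dp1.getD e 0 ≤ (dp1.set (j0 + 1) w).getD e 0 := by
              by_cases hje : e = j0 + 1
              · rw [hje]; exact hcar1
              · rw [hd2ne e hje]
            refine ⟨e, by omega, hen, ?_⟩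
            linarith
      · refine ⟨j0, by omega, hj0n, ?_⟩
        have hm : dp.getD j0 0 ≤ (dp1.set (i + 1) w).getD j0 0 := by
          by_cases hj1 : j0 = i + 1
          · subst hj1; exact le_trans (mono1 _) hcar1
          · rw [hd2ne j0 hj1]; exact mono1 j0
        linarith
  · rw [if_neg hg]
    have hfaeq' : fA s i = fA s (i + 1) := by
      conv_lhs => rw [fA]
      rw [dif_pos hi, if_neg hg]
    set w := max (dp.getD (i + 1) 0) (dp.getD i 0) with hw
    have h1lt : i + 1 < dp.length := by omega
    have hd2self : (dp.set (i + 1) w).getD (i + 1) 0 = w := getD_set_self' dp (i + 1) w 0 h1lt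
    have hd2ne : ∀ j, j ≠ i + 1 → (dp.set (i + 1) w).getD j 0 = dp.getD j 0 :=
      fun j hj => getD_set_ne' dp (i + 1) j w 0 (fun hh => hj hh.symm)
    refine ⟨by rw [List.length_set]; exact hlen, ?_, ?_⟩
    · intro j h1 h2
      by_cases hj1 : j = i + 1
      · subst hj1
        rw [hd2self, hw, ← max_add_add_right]
        apply max_le (hsound _ (by omega) h2)
        linarith
      · rw [hd2ne j hj1]; exact hsound j (by omega) h2
    · rcases Nat.lt_or_ge j0 (i + 1) with hj0lt | hj0ge
      · have hj0eq : j0 = i := by omega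
        subst hj0eq
        refine ⟨j0 + 1, le_refl _, by omega, ?_⟩
        have : dp.getD j0 0 ≤ (dp.set (j0 + 1) w).getD (j0 + 1) 0 := by
          rw [hd2self, hw]; exact le_max_right _ _
        linarith
      · refine ⟨j0, by omega, hj0n, ?_⟩
        have hm : dp.getD j0 0 ≤ (dp.set (i + 1) w).getD j0 0 := by
          by_cases hj1 : j0 = i + 1
          · subst hj1; rw [hd2self, hw]; exact le_max_left _ _
          · rw [hd2ne j0 hj1]
        linarith

lemma loopB_inv (s : List (Int × Int)) (hts : Pre_solution s) (i : Nat) (hi : i ≤ s.length) :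
    InvB s i ((List.range i).foldl (solutionStepB s s.length) (List.replicate (s.length + 1) (0 : Int))) := by
  induction i with
  | zero =>
    refine ⟨by simp, ?_, 0, le_refl _, Nat.zero_le _, ?_⟩
    · intro j _ hj
      rw [List.range_zero, List.foldl_nil, getD_replicate0]
      have := fA_antitone s (Nat.zero_le j)
      linarith
    · rw [List.range_zero, List.foldl_nil, getD_replicate0]
      linarith
  | succ k ih =>
    rw [List.range_succ, List.foldl_append, List.foldl_cons, List.foldl_nil]
    exact stepB_inv s hts k (by omega) _ (ih (by omega))

lemma solution_alt_eq_fA (s : List (Int × Int)) (hts : Pre_solution s) : solution_alt s = fA s 0 := by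
  unfold solution_alt
  simp only []
  obtain ⟨hlen, hsound, j0, hj0i, hj0n, hcomp⟩ := loopB_inv s hts s.length (le_refl _)
  have hj0 : j0 = s.length := by omega
  subst hj0
  rw [fA_of_ge s s.length (le_refl _)] at hcomp
  have h1 := hsound s.length (le_refl _) (le_refl _)
  rw [fA_of_ge s s.length (le_refl _)] at h1
  omega

-- ===== VERDICT (by name: the statement is the Claim_ definition above) =====
theorem solution_spec : Claim_equal_solution := by
  intro s _hdom hpre
  unfold Spec_solution
  rw [solution_eq_fA s hpre, solution_alt_eq_fA s hpre]
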